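-- pv_equiv track=rewrite | github.com/janmalyy/diploma-thesis | diploma_thesis/core/suppl_data_parser.py | get_nearby_lines
-- ===== SOURCE A (Python) =====
-- def get_nearby_lines(
--     text: str,
--     l_start: int,
--     l_end: int,
--     count: int = 200,
-- ) -> tuple[list[str], list[str]]:
--     """
--     Collect lines before and after a given line range.
--
--     Args:
--         text: Full raw text.
--         l_start: Start index of the current line.
--         l_end: End index of the current line.
--         count: Maximum number of lines to collect in each direction.
--
--     Returns:
--         A tuple containing:
--         - Lines before the current line (in original order)
--         - Lines after the current line
--     """
--     lines = []
--     curr = l_start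
--     for _ in range(count):
--         if curr <= 0:
--             break
--         prev = text.rfind("\n", 0, curr - 1)
--         ls = prev + 1 if prev != -1 else 0
--         lines.append(text[ls:curr - 1])
--         curr = ls
--
--     lines_after = []
--     curr = l_end
--     for _ in range(count):
--         if curr >= len(text):
--             break
--         nxt = text.find("\n", curr + 1)
--         le = nxt if nxt != -1 else len(text)
--         lines_after.append(text[curr + 1:le])
--         curr = le
--
--     return list(reversed(lines)), lines_after
-- ===== SOURCE B (Python) =====
-- def get_nearby_lines(
--     text: str,
--     l_start: int,
--     l_end: int,
--     count: int = 200,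
-- ) -> tuple[list[str], list[str]]:
--     if count <= 0:
--         before = []
--     elif l_start > 0:
--         parts = text[:l_start - 1].split("\n")
--         before = parts[max(len(parts) - count, 0):]
--     else:
--         before = []
--     if count <= 0:
--         after = []
--     elif l_end < len(text):
--         after = text[l_end + 1:].split("\n")[:count]
--     else:
--         after = []
--     return before, after
-- ===== Notes on version B (the rewrite author's own statement) =====
-- stated objective: simpler
-- what changed: Replaces A's two index-chasing loops (repeated rfind/find scans collecting one line per iteration, plus a final reverse) with two bulk expressions: slice the text before/after the range once, split on newline, and keep the last/first count pieces.
import Mathlib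
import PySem

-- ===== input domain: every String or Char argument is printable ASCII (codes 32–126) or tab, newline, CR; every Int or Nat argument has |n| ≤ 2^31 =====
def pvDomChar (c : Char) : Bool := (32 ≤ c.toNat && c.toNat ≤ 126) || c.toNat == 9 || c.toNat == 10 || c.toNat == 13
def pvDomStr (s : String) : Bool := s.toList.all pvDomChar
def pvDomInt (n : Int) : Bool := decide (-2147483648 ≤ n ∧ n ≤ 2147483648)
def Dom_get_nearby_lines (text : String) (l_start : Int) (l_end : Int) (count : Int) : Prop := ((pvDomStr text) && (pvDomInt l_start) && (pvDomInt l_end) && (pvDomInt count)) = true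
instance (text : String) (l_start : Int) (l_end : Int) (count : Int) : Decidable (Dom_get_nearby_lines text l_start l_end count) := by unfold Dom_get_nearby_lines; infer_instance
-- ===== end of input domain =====

-- B replaces A's index-chasing rfind/find loops by two bulk slice-then-split('\n') expressions (simpler, same cost).


-- ===== PORT A =====
-- the first `for _ in range(count)` loop of A (fuel = count; state: curr, lines)
def gnlBeforeLoop (cs : List Char) : Nat → Int → List String → List String
  | 0, _, lines => lines
  | f + 1, curr, lines =>
    if curr ≤ 0 then lines
    else
      let prev := PySem.Chars.rfindFrom cs ['\n'] 0 (some (curr - 1))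
      let ls := if prev ≠ -1 then prev + 1 else 0
      gnlBeforeLoop cs f ls (lines ++ [String.ofList (PySem.List.slice cs (some ls) (some (curr - 1)))])

-- the second `for _ in range(count)` loop of A (fuel = count; state: curr, lines_after)
def gnlAfterLoop (cs : List Char) : Nat → Int → List String → List String
  | 0, _, lines => lines
  | f + 1, curr, lines =>
    if curr ≥ (cs.length : Int) then lines
    else
      let nxt := PySem.Chars.findFrom cs ['\n'] (curr + 1) none
      let le := if nxt ≠ -1 then nxt else (cs.length : Int)
      gnlAfterLoop cs f le (lines ++ [String.ofList (PySem.List.slice cs (some (curr + 1)) (some le))])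

def get_nearby_lines (text : String) (l_start : Int) (l_end : Int) (count : Int) : List String × List String :=
  let cs := text.toList
  ((gnlBeforeLoop cs count.toNat l_start []).reverse, gnlAfterLoop cs count.toNat l_end [])

-- ===== PORT B =====
def get_nearby_lines_alt (text : String) (l_start : Int) (l_end : Int) (count : Int) : List String × List String :=
  let cs := text.toList
  let before :=
    if count ≤ 0 then []
    else if 0 < l_start then
      let parts := PySem.Chars.splitOn (PySem.List.slice cs none (some (l_start - 1))) ['\n']
      (parts.drop (parts.length - count.toNat)).map String.ofList
    else []
  let after :=
    if count ≤ 0 then []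
    else if l_end < (cs.length : Int) then
      ((PySem.Chars.splitOn (PySem.List.slice cs (some (l_end + 1)) none) ['\n']).take count.toNat).map String.ofList
    else []
  (before, after)

-- ===== PRECONDITION & SPEC =====
def Spec_get_nearby_lines (text : String) (l_start : Int) (l_end : Int) (count : Int) (out : List String × List String) : Prop := out = get_nearby_lines_alt text l_start l_end count
instance (text : String) (l_start : Int) (l_end : Int) (count : Int) (out : List String × List String) : Decidable (Spec_get_nearby_lines text l_start l_end count out) := by unfold Spec_get_nearby_lines; infer_instance

-- ===== CLAIM (what is proved, stated in full; the proofs are below) =====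
def Claim_equal_get_nearby_lines : Prop := ∀ (text : String) (l_start : Int) (l_end : Int) (count : Int), Dom_get_nearby_lines text l_start l_end count → Spec_get_nearby_lines text l_start l_end count (get_nearby_lines text l_start l_end count)

-- ===== LEMMAS AND PROOFS =====

-- the split of a char list on '\n', structurally
def pvSplit : List Char → List (List Char)
  | [] => [[]]
  | c :: t => if c = '\n' then [] :: pvSplit t else (pvSplit t).modifyHead (c :: ·)

-- first index of '\n', structurally
def pvFind : List Char → Int
  | [] => -1
  | c :: t => if c = '\n' then 0 else (if pvFind t = -1 then -1 else pvFind t + 1)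

-- last index i ≤ j with cs[i] = '\n'
def pvLastUpto (p : List Char) : Nat → Int
  | 0 => if p.head? = some '\n' then 0 else -1
  | j + 1 => if p[j + 1]? = some '\n' then (j : Int) + 1 else pvLastUpto p j

theorem pvSplit_ne_nil (s : List Char) : pvSplit s ≠ [] := by
  cases s with
  | nil => simp [pvSplit]
  | cons c t =>
    simp only [pvSplit]
    split
    · simp
    · cases h : pvSplit t with
      | nil => exact absurd h (pvSplit_ne_nil t)
      | cons a l => simp

theorem isPrefixOf_singleton (c : Char) (l : List Char) : [c].isPrefixOf l = (l.head? == some c) := by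
  cases l with
  | nil => simp [List.isPrefixOf]
  | cons a t => simp [List.isPrefixOf, eq_comm]

theorem splitOn_go_spec (fuel : Nat) (l cur : List Char) (acc : List (List Char)) (h : l.length < fuel) :
    PySem.Chars.splitOn.go ['\n'] fuel l cur acc = acc.reverse ++ (pvSplit l).modifyHead (cur.reverse ++ ·) := by
  induction fuel generalizing l cur acc with
  | zero => omega
  | succ f ih =>
    cases l with
    | nil =>
      rw [PySem.Chars.splitOn.go]
      · simp [pvSplit]
      · omega
    | cons c rest =>
      rw [PySem.Chars.splitOn.go]
      rw [isPrefixOf_singleton]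
      simp only [List.head?_cons]
      by_cases hc : c = '\n'
      · subst hc
        simp only [beq_self_eq_true, if_true]
        rw [ih _ _ _ (by simpa using Nat.lt_of_succ_lt_succ h)]
        simp only [pvSplit, if_pos rfl]
        simp only [List.nil_append, List.reverse_nil]
        cases hs : pvSplit rest with
        | nil => exact absurd hs (pvSplit_ne_nil rest)
        | cons a t => simp [hs]
      · have : (some c == some '\n') = false := by simpa using hc
        simp only [this]
        simp only [Bool.false_eq_true, if_false]
        rw [ih _ _ _ (by simpa using Nat.lt_of_succ_lt_succ h)]
        simp only [pvSplit, if_neg hc]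
        cases hs : pvSplit rest with
        | nil => exact absurd hs (pvSplit_ne_nil rest)
        | cons a t => simp

theorem splitOn_eq (s : List Char) : PySem.Chars.splitOn s ['\n'] = pvSplit s := by
  rw [PySem.Chars.splitOn, splitOn_go_spec _ _ _ _ (by omega)]
  cases hs : pvSplit s with
  | nil => exact absurd hs (pvSplit_ne_nil s)
  | cons a t => simp

theorem pvFind_spec (s : List Char) (h : pvFind s ≠ -1) : 0 ≤ pvFind s ∧ pvFind s < s.length := by
  induction s with
  | nil => simp [pvFind] at h
  | cons c t ih =>
    simp only [pvFind] at h ⊢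
    by_cases hc : c = '\n'
    · simp [hc]
    · rw [if_neg hc] at h ⊢
      by_cases ht : pvFind t = -1
      · simp [ht] at h
      · rw [if_neg ht] at h ⊢
        have := ih ht
        simp only [List.length_cons]
        omega

theorem find_go_spec (t : List Char) (k : Nat) :
    PySem.Chars.find.go ['\n'] t k = if pvFind t = -1 then -1 else pvFind t + k := by
  induction t generalizing k with
  | nil => simp [PySem.Chars.find.go, pvFind]
  | cons c rest ih =>
    rw [PySem.Chars.find.go, isPrefixOf_singleton]
    simp only [List.head?_cons]
    by_cases hc : c = '\n'
    · subst hc; simp [pvFind]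
    · have hbe : (some c == some '\n') = false := by simpa using hc
      simp only [hbe]
      simp only [Bool.false_eq_true, if_false, ih]
      simp only [pvFind, if_neg hc]
      split
      · rfl
      · rename_i ht
        rw [if_neg (by have := pvFind_spec rest ht; omega)]
        push_cast; ring

theorem find_eq_pvFind (s : List Char) : PySem.Chars.find s ['\n'] = pvFind s := by
  rw [PySem.Chars.find, find_go_spec]
  split <;> omega

theorem pvSplit_of_no_nl (p : List Char) (h : ∀ c ∈ p, c ≠ '\n') : pvSplit p = [p] := by
  induction p with
  | nil => rfl
  | cons c t ih =>
    have hc : c ≠ '\n' := h c (by simp)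
    simp only [pvSplit, if_neg hc]
    rw [ih (fun x hx => h x (by simp [hx]))]
    simp

theorem pvSplit_of_find_neg (s : List Char) (h : pvFind s = -1) : pvSplit s = [s] := by
  apply pvSplit_of_no_nl
  intro c hc hcn
  subst hcn
  induction s with
  | nil => simp at hc
  | cons a t ih =>
    simp only [pvFind] at h
    by_cases ha : a = '\n'
    · simp [ha] at h
    · rw [if_neg ha] at h
      by_cases ht : pvFind t = -1
      · rcases (List.mem_cons.mp hc) with h1 | h1
        · exact ha h1.symm
        · exact ih ht h1
      · rw [if_neg ht] at h
        have := pvFind_spec t ht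
        omega

theorem pvSplit_of_find_nonneg (s : List Char) (h : pvFind s ≠ -1) :
    pvSplit s = s.take (pvFind s).toNat :: pvSplit (s.drop ((pvFind s).toNat + 1)) := by
  induction s with
  | nil => simp [pvFind] at h
  | cons c t ih =>
    by_cases hc : c = '\n'
    · subst hc
      simp [pvSplit, pvFind]
    · simp only [pvFind, if_neg hc] at h ⊢
      by_cases ht : pvFind t = -1
      · simp [ht] at h
      · rw [if_neg ht] at h ⊢
        have hsp := pvFind_spec t ht
        have htn : (pvFind t + 1).toNat = (pvFind t).toNat + 1 := by omega
        simp only [pvSplit, if_neg hc, htn]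
        rw [ih ht]
        simp

theorem modifyHead_append_ne_nil {α : Type} (f : α → α) (xs : List α) (y : α) (h : xs ≠ []) :
    (xs ++ [y]).modifyHead f = xs.modifyHead f ++ [y] := by
  cases xs with
  | nil => exact absurd rfl h
  | cons a t => simp

theorem pvSplit_split_at_last (p : List Char) (j : Nat) (hj : p[j]? = some '\n')
    (hafter : ∀ i, j < i → p[i]? ≠ some '\n') :
    pvSplit p = pvSplit (p.take j) ++ [p.drop (j + 1)] := by
  induction p generalizing j with
  | nil => simp at hj
  | cons c t ih =>
    cases j with
    | zero =>
      simp only [List.getElem?_cons_zero, Option.some.injEq] at hj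
      subst hj
      simp only [pvSplit, if_pos rfl, List.take_zero, List.drop_succ_cons, List.drop_zero]
      rw [pvSplit_of_no_nl t ?_]
      · simp [pvSplit]
      · intro x hx hxn
        subst hxn
        obtain ⟨i, hi, hig⟩ := List.getElem_of_mem hx
        exact hafter (i + 1) (by omega) (by simpa [hig] using List.getElem?_eq_getElem hi)
    | succ j' =>
      simp only [List.getElem?_cons_succ] at hj
      have hafter' : ∀ i, j' < i → t[i]? ≠ some '\n' := by
        intro i hi
        have := hafter (i + 1) (by omega)
        simpa using this
      by_cases hc : c = '\n'
      · subst hc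
        simp only [pvSplit, if_pos rfl, List.take_succ_cons, List.drop_succ_cons]
        rw [ih j' hj hafter']
        simp [pvSplit]
      · simp only [pvSplit, if_neg hc, List.take_succ_cons, List.drop_succ_cons]
        rw [ih j' hj hafter']
        rw [modifyHead_append_ne_nil _ _ _ (pvSplit_ne_nil _)]

theorem rfind_go_eq (p : List Char) (j : Nat) : PySem.Chars.rfind.go p ['\n'] j = pvLastUpto p j := by
  induction j with
  | zero =>
    rw [PySem.Chars.rfind.go, isPrefixOf_singleton]
    simp only [pvLastUpto, List.drop_zero]
    split <;> simp_all
  | succ j' ih =>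
    rw [PySem.Chars.rfind.go, isPrefixOf_singleton]
    simp only [pvLastUpto, List.head?_drop]
    split <;> simp_all

theorem rfind_eq_pvLastUpto (p : List Char) : PySem.Chars.rfind p ['\n'] = pvLastUpto p p.length := by
  rw [PySem.Chars.rfind, rfind_go_eq]

theorem pvLastUpto_neg (p : List Char) (j : Nat) (h : pvLastUpto p j = -1) :
    ∀ i ≤ j, p[i]? ≠ some '\n' := by
  induction j with
  | zero =>
    intro i hi
    interval_cases i
    simp only [pvLastUpto] at h
    rw [← List.head?_eq_getElem?]
    intro hc
    simp [hc] at h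
  | succ j' ih =>
    intro i hi
    simp only [pvLastUpto] at h
    by_cases hc : p[j' + 1]? = some '\n'
    · rw [if_pos hc] at h; omega
    · rw [if_neg hc] at h
      rcases Nat.lt_or_ge i (j' + 1) with h1 | h1
      · exact ih h i (by omega)
      · have : i = j' + 1 := by omega
        subst this; exact hc

theorem pvLastUpto_nonneg (p : List Char) (j : Nat) (h : 0 ≤ pvLastUpto p j) :
    (pvLastUpto p j).toNat ≤ j ∧ p[(pvLastUpto p j).toNat]? = some '\n' ∧
      ∀ i, (pvLastUpto p j).toNat < i → p[i]? ≠ some '\n' ∨ i > j := by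
  induction j with
  | zero =>
    simp only [pvLastUpto] at h ⊢
    by_cases hc : p.head? = some '\n'
    · rw [if_pos hc]
      refine ⟨by simp, by simpa [← List.head?_eq_getElem?] using hc, ?_⟩
      intro i hi
      right; simpa using hi
    · simp [hc] at h
  | succ j' ih =>
    simp only [pvLastUpto] at h ⊢
    by_cases hc : p[j' + 1]? = some '\n'
    · rw [if_pos hc]
      refine ⟨by simp, by simpa using hc, ?_⟩
      intro i hi
      right
      omega
    · rw [if_neg hc] at h ⊢
      obtain ⟨h1, h2, h3⟩ := ih h
      refine ⟨by omega, h2, ?_⟩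
      intro i hi
      rcases h3 i hi with h4 | h4
      · exact Or.inl h4
      · rcases Nat.lt_or_ge (j' + 1) i with h5 | h5
        · exact Or.inr h5
        · have : i = j' + 1 := by omega
          subst this; exact Or.inl hc

-- trivial exits of the two loops
theorem gnlBeforeLoop_exit (cs : List Char) (f : Nat) (curr : Int) (acc : List String) (h : curr ≤ 0) :
    gnlBeforeLoop cs f curr acc = acc := by
  cases f with
  | zero => rfl
  | succ f' => simp [gnlBeforeLoop, if_pos h]

theorem gnlAfterLoop_exit (cs : List Char) (f : Nat) (curr : Int) (acc : List String) (h : (cs.length : Int) ≤ curr) :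
    gnlAfterLoop cs f curr acc = acc := by
  cases f with
  | zero => rfl
  | succ f' => simp [gnlAfterLoop, if_pos (by omega : curr ≥ (cs.length : Int))]

-- what A's rfindFrom call computes, in terms of pvLastUpto of the prefix
theorem rfindFrom_spec (cs : List Char) (curr : Int) (h : 1 ≤ curr) :
    PySem.Chars.rfindFrom cs ['\n'] 0 (some (curr - 1)) =
      pvLastUpto (cs.take (curr - 1).toNat) (cs.take (curr - 1).toNat).length := by
  rw [← rfind_eq_pvLastUpto]
  rw [PySem.Chars.rfindFrom]
  simp only [if_neg (lt_irrefl (0 : Int))]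
  by_cases hn : (cs.length : Int) < curr - 1
  · rw [if_pos hn, if_neg (by omega : ¬ ((cs.length : Int) < 0))]
    simp only [Int.toNat_zero, List.drop_zero, Int.toNat_natCast, List.take_length]
    rw [List.take_of_length_le (by omega)]
    split <;> omega
  · rw [if_neg hn, if_neg (by omega : ¬ (curr - 1 < 0)), if_neg (by omega : ¬ (curr - 1 < 0))]
    simp only [Int.toNat_zero, List.drop_zero]
    split <;> omega

-- what A's findFrom call computes, in terms of pvFind of the suffix
theorem findFrom_spec (cs : List Char) (curr : Int) (h : curr < (cs.length : Int)) :
    PySem.Chars.findFrom cs ['\n'] (curr + 1) none =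
      (if pvFind (cs.drop (PySem.List.clampIdx cs.length (curr + 1))) = -1 then -1
       else (PySem.List.clampIdx cs.length (curr + 1) : Int) + pvFind (cs.drop (PySem.List.clampIdx cs.length (curr + 1)))) := by
  have hk : ((if curr + 1 < 0 then if curr + 1 + (cs.length : Int) < 0 then 0 else curr + 1 + (cs.length : Int) else curr + 1) : Int)
      = (PySem.List.clampIdx cs.length (curr + 1) : Int) := by
    simp only [PySem.List.clampIdx]
    split_ifs <;> omega
  rw [PySem.Chars.findFrom]
  simp only [hk]
  rw [if_neg (by
    have : PySem.List.clampIdx cs.length (curr + 1) ≤ cs.length := by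
      simp only [PySem.List.clampIdx]; split_ifs <;> omega
    omega)]
  simp only [Int.toNat_natCast, List.take_length, find_eq_pvFind]

theorem pvLastUpto_ge (p : List Char) (j : Nat) : -1 ≤ pvLastUpto p j := by
  induction j with
  | zero => simp only [pvLastUpto]; split <;> omega
  | succ j' ih => simp only [pvLastUpto]; split <;> omega

theorem slice_before (cs : List Char) (curr : Int) (j : Nat) (h1 : 1 ≤ curr)
    (hj : j < (cs.take (curr - 1).toNat).length) :
    PySem.List.slice cs (some ((j : Int) + 1)) (some (curr - 1)) = (cs.take (curr - 1).toNat).drop (j + 1) := by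
  simp only [List.length_take] at hj
  rw [PySem.List.slice]
  have ha : PySem.List.clampIdx cs.length ((j : Int) + 1) = j + 1 := by
    simp only [PySem.List.clampIdx]; split_ifs <;> omega
  have hb : PySem.List.clampIdx cs.length (curr - 1) = min (curr - 1).toNat cs.length := by
    simp only [PySem.List.clampIdx]; split_ifs <;> omega
  rw [ha, hb, List.drop_take]
  rcases Nat.lt_or_ge (curr - 1).toNat cs.length with hc | hc
  · congr 1
    omega
  · rw [List.take_of_length_le (by simp only [List.length_drop]; omega),
        List.take_of_length_le (by simp only [List.length_drop]; omega)]

theorem gnlBeforeLoop_spec (cs : List Char) (f : Nat) (curr : Int) (acc : List String) (h : 1 ≤ curr) :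
    gnlBeforeLoop cs f curr acc =
      acc ++ (((pvSplit (cs.take (curr - 1).toNat)).drop ((pvSplit (cs.take (curr - 1).toNat)).length - f)).map String.ofList).reverse := by
  induction f generalizing curr acc with
  | zero => simp [gnlBeforeLoop]
  | succ f ih =>
    rw [gnlBeforeLoop, if_neg (by omega : ¬ curr ≤ 0)]
    simp only [rfindFrom_spec cs curr h]
    set p := cs.take (curr - 1).toNat with hp
    set J := pvLastUpto p p.length with hJ
    by_cases hneg : J = -1
    · rw [if_neg (by simp [hneg])]
      have hnonl : ∀ c ∈ p, c ≠ '\n' := by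
        intro x hx hxn
        subst hxn
        obtain ⟨i, hi, hig⟩ := List.getElem_of_mem hx
        exact pvLastUpto_neg p p.length (hJ ▸ hneg) i (by omega)
          (by simpa [hig] using List.getElem?_eq_getElem hi)
      have hsl : PySem.List.slice cs (some 0) (some (curr - 1)) = p := by
        rw [PySem.List.slice]
        have ha : PySem.List.clampIdx cs.length 0 = 0 := by
          simp only [PySem.List.clampIdx]; split_ifs <;> omega
        have hb : PySem.List.clampIdx cs.length (curr - 1) = min (curr - 1).toNat cs.length := by
          simp only [PySem.List.clampIdx]; split_ifs <;> omega
        rw [ha, hb]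
        simp only [List.drop_zero, Nat.sub_zero, hp]
        rcases Nat.lt_or_ge (curr - 1).toNat cs.length with hc | hc
        · congr 1; omega
        · rw [List.take_of_length_le (by omega), List.take_of_length_le (by omega)]
      rw [hsl, gnlBeforeLoop_exit cs f 0 _ (by omega)]
      rw [pvSplit_of_no_nl p hnonl]
      simp
    · have h0J : 0 ≤ J := by have := pvLastUpto_ge p p.length; omega
      obtain ⟨hle, hget, hafter0⟩ := pvLastUpto_nonneg p p.length (hJ ▸ h0J)
      rw [← hJ] at hle hget hafter0
      set j := J.toNat with hjdef
      have hjlt : j < p.length := by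
        by_contra hcon
        rw [List.getElem?_eq_none (by omega)] at hget
        simp at hget
      have hafter : ∀ i, j < i → p[i]? ≠ some '\n' := by
        intro i hi
        rcases hafter0 i hi with h4 | h4
        · exact h4
        · rw [List.getElem?_eq_none (by omega)]
          simp
      rw [if_pos (by omega : J ≠ -1)]
      have hJ1 : J + 1 = ((j : Int) + 1) := by omega
      rw [hJ1, slice_before cs curr j h hjlt]
      have hsplit := pvSplit_split_at_last p j hget hafter
      have hc1 : (1 : Int) ≤ (j : Int) + 1 := by omega
      rw [ih ((j : Int) + 1) _ hc1]
      have htj : cs.take (((j : Int) + 1) - 1).toNat = p.take j := by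
        have hjj : (((j : Int) + 1) - 1).toNat = j := by omega
        have hjlt' := hjlt
        rw [hp] at hjlt'
        simp only [List.length_take] at hjlt'
        rw [hjj, hp, List.take_take]
        have hmin : min j (curr - 1).toNat = j := by omega
        rw [hmin]
      rw [htj, hsplit]
      simp only [List.length_append, List.length_singleton]
      have harith : (pvSplit (p.take j)).length + 1 - (f + 1) = (pvSplit (p.take j)).length - f := by omega
      rw [harith, List.drop_append_of_le_length (by omega)]
      simp only [List.map_append, List.map_cons, List.map_nil, List.reverse_append,
        List.reverse_cons, List.reverse_nil, List.nil_append, List.append_assoc,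
        List.cons_append, List.singleton_append]
      rw [hp]

theorem gnlAfterLoop_spec (cs : List Char) (f : Nat) (curr : Int) (acc : List String) (h : curr < (cs.length : Int)) :
    gnlAfterLoop cs f curr acc =
      acc ++ ((pvSplit (cs.drop (PySem.List.clampIdx cs.length (curr + 1)))).take f).map String.ofList := by
  induction f generalizing curr acc with
  | zero => simp [gnlAfterLoop]
  | succ f ih =>
    rw [gnlAfterLoop, if_neg (by omega : ¬ curr ≥ (cs.length : Int))]
    rw [findFrom_spec cs curr h]
    set k := PySem.List.clampIdx cs.length (curr + 1) with hk
    have hkle : k ≤ cs.length := by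
      rw [hk]; simp only [PySem.List.clampIdx]; split_ifs <;> omega
    set s := cs.drop k with hs
    have hslen : s.length = cs.length - k := by rw [hs]; simp
    by_cases hfnd : pvFind s = -1
    · rw [if_pos hfnd]
      simp only [ne_eq, not_true_eq_false, if_false]
      have hsl : PySem.List.slice cs (some (curr + 1)) (some (cs.length : Int)) = s := by
        rw [PySem.List.slice]
        have hb : PySem.List.clampIdx cs.length ((cs.length : Nat) : Int) = cs.length := by
          simp only [PySem.List.clampIdx]; split_ifs <;> omega
        rw [hb, ← hk]
        rw [List.take_of_length_le (by simp only [List.length_drop]; omega)]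
      rw [hsl, gnlAfterLoop_exit cs f _ _ (le_refl _)]
      rw [pvSplit_of_find_neg s hfnd]
      simp
    · have hr := pvFind_spec s hfnd
      rw [if_neg hfnd]
      simp only [ne_eq]
      rw [if_pos (show ¬((k : Int) + pvFind s = -1) by omega)]
      have hsl : PySem.List.slice cs (some (curr + 1)) (some ((k : Int) + pvFind s)) = s.take (pvFind s).toNat := by
        rw [PySem.List.slice]
        have hb : PySem.List.clampIdx cs.length ((k : Int) + pvFind s) = k + (pvFind s).toNat := by
          simp only [PySem.List.clampIdx]; split_ifs <;> omega
        rw [hb, ← hk, hs]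
        congr 1
        omega
      rw [hsl, ih ((k : Int) + pvFind s) _ (by omega)]
      have hknext : PySem.List.clampIdx cs.length ((k : Int) + pvFind s + 1) = k + (pvFind s).toNat + 1 := by
        simp only [PySem.List.clampIdx]; split_ifs <;> omega
      rw [hknext]
      have hdrop : cs.drop (k + (pvFind s).toNat + 1) = s.drop ((pvFind s).toNat + 1) := by
        rw [hs, List.drop_drop]
        try congr 1
        try omega
      rw [hdrop, pvSplit_of_find_nonneg s hfnd]
      simp

theorem take_clamped (cs : List Char) (a : Int) (ha : 0 ≤ a) :
    PySem.List.slice cs none (some a) = cs.take a.toNat := by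
  rw [PySem.List.slice]
  have hb : PySem.List.clampIdx cs.length a = min a.toNat cs.length := by
    simp only [PySem.List.clampIdx]; split_ifs <;> omega
  rw [hb]
  simp only [List.drop_zero, Nat.sub_zero]
  rcases Nat.lt_or_ge a.toNat cs.length with hc | hc
  · congr 1; omega
  · rw [List.take_of_length_le (by omega), List.take_of_length_le (by omega)]

theorem slice_from_clamp (cs : List Char) (a : Int) :
    PySem.List.slice cs (some a) none = cs.drop (PySem.List.clampIdx cs.length a) := by
  rw [PySem.List.slice]
  have hk : PySem.List.clampIdx cs.length a ≤ cs.length := by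
    simp only [PySem.List.clampIdx]; split_ifs <;> omega
  rw [List.take_of_length_le (by simp only [List.length_drop]; omega)]

-- ===== VERDICT (by name: the statement is the Claim_ definition above) =====
theorem get_nearby_lines_spec : Claim_equal_get_nearby_lines := by
  intro text l_start l_end count _hdom
  simp only [Spec_get_nearby_lines, get_nearby_lines, get_nearby_lines_alt, Prod.mk.injEq]
  set cs := text.toList with hcs
  by_cases hc : count ≤ 0
  · have h0 : count.toNat = 0 := by omega
    rw [h0]
    simp [gnlBeforeLoop, gnlAfterLoop, hc]
  · rw [if_neg hc, if_neg hc]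
    constructor
    · by_cases hs : 0 < l_start
      · rw [if_pos hs]
        rw [gnlBeforeLoop_spec cs count.toNat l_start [] (by omega)]
        rw [take_clamped cs (l_start - 1) (by omega), splitOn_eq]
        simp
      · rw [if_neg hs, gnlBeforeLoop_exit cs _ _ _ (by omega)]
        simp
    · by_cases ha : l_end < (cs.length : Int)
      · rw [if_pos ha]
        rw [gnlAfterLoop_spec cs count.toNat l_end [] ha]
        rw [slice_from_clamp, splitOn_eq]
        simp
      · rw [if_neg ha, gnlAfterLoop_exit cs _ _ _ (by omega)]
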